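-- pv_equiv track=rewrite | github.com/SeanyDcode/codechallenges | dailychallenge1.py | check_total
-- ===== SOURCE A (Python) =====
-- def check_total(array, k):
--
--     length = len(array)
--
--     # iterate through all array values except last one
--     for i in range(length - 1):
--
--         # initialize counter for comparing other values in array with current value
--         j = i + 1
--
--         # find remainder to compare to other array values
--         remainder = k % array[i]
--
--         # iterate through other values after ith value in array
--         while j < length:
--
--             # if remainder matches another value in array, return True
--             if remainder == array[j]:
--                 return True
--
--             j += 1
--
--     return False
-- ===== SOURCE B (Python) =====
-- def check_total(array, k):
--     last = {}
--     for j, v in enumerate(array):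
--         last[v] = j
--     for i in range(len(array) - 1):
--         if last.get(k % array[i], -1) > i:
--             return True
--     return False
-- ===== Notes on version B (the rewrite author's own statement) =====
-- stated objective: faster
-- what changed: A's nested scan (for each i, rescan the whole suffix for k%array[i]) is replaced by building a value-to-last-index dict in one pass and then checking each k%array[i] with a single O(1) lookup.
import Mathlib
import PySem

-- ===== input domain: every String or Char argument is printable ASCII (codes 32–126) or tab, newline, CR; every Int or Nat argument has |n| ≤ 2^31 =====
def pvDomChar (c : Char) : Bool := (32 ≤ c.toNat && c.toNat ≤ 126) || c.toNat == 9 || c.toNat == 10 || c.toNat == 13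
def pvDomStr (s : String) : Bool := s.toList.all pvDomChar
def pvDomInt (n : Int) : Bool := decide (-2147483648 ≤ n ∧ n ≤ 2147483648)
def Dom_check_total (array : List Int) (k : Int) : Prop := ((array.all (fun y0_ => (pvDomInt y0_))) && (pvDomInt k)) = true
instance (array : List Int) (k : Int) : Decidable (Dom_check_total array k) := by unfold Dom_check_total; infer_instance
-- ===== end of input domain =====

-- B replaces A's quadratic nested suffix rescans by one dict of each value's last index plus one lookup pass (asymptotically faster); same return value.

-- ===== PORT A =====
-- inner 'while j < length: if remainder == array[j]: return True; j += 1'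
def ctA_while (array : List Int) (remainder : Int) (j : Nat) : Bool :=
  if _h : j < array.length then
    if remainder = array.getD j 0 then true
    else ctA_while array remainder (j + 1)
  else false
termination_by array.length - j

-- outer 'for i in range(length - 1)' with early return True
def ctA_for (array : List Int) (k : Int) (i : Nat) : Bool :=
  if _h : i + 1 < array.length then
    if ctA_while array (PySem.Int.mod k (array.getD i 0)) (i + 1) then true
    else ctA_for array k (i + 1)
  else false
termination_by array.length - i

def check_total (array : List Int) (k : Int) : Bool := ctA_for array k 0

-- ===== PORT B =====
-- 'last = {}; for j, v in enumerate(array): last[v] = j'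
def ctB_last (array : List Int) : PySem.Dict Int Int :=
  (PySem.List.enumerate array 0).foldl (fun d p => PySem.Dict.insert d p.2 p.1) PySem.Dict.empty

-- 'for i in range(len(array) - 1): if last.get(k % array[i], -1) > i: return True'
def ctB_loop (array : List Int) (k : Int) (last : PySem.Dict Int Int) (i : Nat) : Bool :=
  if _h : i + 1 < array.length then
    if (i : Int) < PySem.Dict.getD last (PySem.Int.mod k (array.getD i 0)) (-1) then true
    else ctB_loop array k last (i + 1)
  else false
termination_by array.length - i

def check_total_alt (array : List Int) (k : Int) : Bool :=
  ctB_loop array k (ctB_last array) 0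

-- ===== PRECONDITION & SPEC =====
-- Pre_ excludes exactly the inputs on which Python A raises ZeroDivisionError (it reaches a
-- first zero at a position before the last element without having already found a match);
-- Python B evaluates the same k % array[i] in the same order, so it raises on exactly the
-- same inputs. No input on which A returns a value is excluded.
def Pre_check_total (array : List Int) (k : Int) : Prop :=
  ∀ i < array.length,
    (i + 1 < array.length ∧ array.getD i 0 = 0 ∧ ∀ i' < i, array.getD i' 0 ≠ 0) →
    ∃ i' < i, ∃ j < array.length, i' < j ∧
      PySem.Int.mod k (array.getD i' 0) = array.getD j 0
instance (array : List Int) (k : Int) : Decidable (Pre_check_total array k) := by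
  unfold Pre_check_total; infer_instance
def pvWitness_check_total : List Int × Int := ([3, 1], 7)

def Spec_check_total (array : List Int) (k : Int) (out : Bool) : Prop := out = check_total_alt array k
instance (array : List Int) (k : Int) (out : Bool) : Decidable (Spec_check_total array k out) := by
  unfold Spec_check_total; infer_instance

-- ===== CLAIM =====
def Claim_equal_check_total : Prop :=
  ∀ (array : List Int) (k : Int), Dom_check_total array k → Pre_check_total array k →
    Spec_check_total array k (check_total array k)

-- ===== LEMMAS AND PROOFS =====

theorem ctA_while_iff (a : List Int) (r : Int) :
    ∀ d j, a.length - j = d →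
      (ctA_while a r j = true ↔ ∃ j', j ≤ j' ∧ j' < a.length ∧ r = a.getD j' 0) := by
  intro d
  induction d with
  | zero =>
      intro j hj
      rw [ctA_while]
      constructor
      · intro h; split_ifs at h <;> omega
      · rintro ⟨j', h1, h2, _⟩; omega
  | succ d ih =>
      intro j hj
      rw [ctA_while]
      by_cases h1 : j < a.length
      · simp only [h1, dif_pos]
        by_cases h2 : r = a.getD j 0
        · rw [if_pos h2]
          exact ⟨fun _ => ⟨j, le_refl _, h1, h2⟩, fun _ => rfl⟩
        · rw [if_neg h2, ih (j + 1) (by omega)]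
          constructor
          · rintro ⟨j', hle, hlt, he⟩; exact ⟨j', by omega, hlt, he⟩
          · rintro ⟨j', hle, hlt, he⟩
            refine ⟨j', ?_, hlt, he⟩
            rcases Nat.eq_or_lt_of_le hle with h | h
            · exact absurd (h ▸ he) h2
            · omega
      · simp only [h1, dif_neg, not_false_iff]
        constructor
        · intro h; exact absurd h (by simp)
        · rintro ⟨j', h2, h3, _⟩; omega

theorem ctA_for_iff (a : List Int) (k : Int) :
    ∀ d i, a.length - i = d →
      (ctA_for a k i = true ↔
        ∃ i', i ≤ i' ∧ i' + 1 < a.length ∧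
          ∃ j, i' < j ∧ j < a.length ∧ PySem.Int.mod k (a.getD i' 0) = a.getD j 0) := by
  intro d
  induction d with
  | zero =>
      intro i hi
      rw [ctA_for]
      constructor
      · intro h; split_ifs at h <;> omega
      · rintro ⟨i', h1, h2, _⟩; omega
  | succ d ih =>
      intro i hi
      rw [ctA_for]
      by_cases h1 : i + 1 < a.length
      · simp only [h1, dif_pos]
        by_cases h2 : ctA_while a (PySem.Int.mod k (a.getD i 0)) (i + 1) = true
        · rw [if_pos h2]
          rw [ctA_while_iff a _ (a.length - (i + 1)) (i + 1) rfl] at h2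
          obtain ⟨j, hj1, hj2, hj3⟩ := h2
          exact ⟨fun _ => ⟨i, le_refl _, h1, j, by omega, hj2, hj3⟩, fun _ => rfl⟩
        · rw [if_neg h2, ih (i + 1) (by omega)]
          rw [ctA_while_iff a _ (a.length - (i + 1)) (i + 1) rfl] at h2
          push Not at h2
          constructor
          · rintro ⟨i', hle, hlt, j, hj1, hj2, hj3⟩
            exact ⟨i', by omega, hlt, j, hj1, hj2, hj3⟩
          · rintro ⟨i', hle, hlt, j, hj1, hj2, hj3⟩
            refine ⟨i', ?_, hlt, j, hj1, hj2, hj3⟩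
            rcases Nat.eq_or_lt_of_le hle with h | h
            · subst h; exact absurd hj3 (h2 j (by omega) hj2)
            · omega
      · simp only [h1, dif_neg, not_false_iff]
        constructor
        · intro h; exact absurd h (by simp)
        · rintro ⟨i', h2, h3, _⟩; omega

-- the dict maps v to its LAST index in a: getD … (-1) > i ↔ v occurs at some index > i
theorem getD_ctB_last_gt (a : List Int) :
    ∀ (v : Int) (i : Nat),
      ((i : Int) < PySem.Dict.getD (ctB_last a) v (-1) ↔
        ∃ j, j < a.length ∧ i < j ∧ a.getD j 0 = v) := by
  induction a using List.reverseRecOn with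
  | nil =>
      intro v i
      simp only [ctB_last, PySem.List.enumerate_nil, List.foldl_nil, PySem.Dict.getD_empty,
        List.length_nil]
      constructor
      · intro h; omega
      · rintro ⟨j, hj, _, _⟩; omega
  | append_singleton a x ih =>
      intro v i
      have hfold : ctB_last (a ++ [x]) =
          PySem.Dict.insert (ctB_last a) x (a.length : Int) := by
        unfold ctB_last
        rw [PySem.List.enumerate_append]
        simp [PySem.List.enumerate, List.foldl_append]
      rw [hfold, PySem.Dict.getD_insert]
      by_cases hv : v = x
      · rw [if_pos hv]
        constructor
        · intro h
          exact ⟨a.length, by simp, by exact_mod_cast h, by simp [hv]⟩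
        · rintro ⟨j, hj1, hj2, _⟩
          simp only [List.length_append, List.length_singleton] at hj1
          have : j ≤ a.length := by omega
          have : (i:Int) < (j:Int) := by exact_mod_cast hj2
          omega
      · rw [if_neg hv, ih]
        constructor
        · rintro ⟨j, hj1, hj2, hj3⟩
          refine ⟨j, by simp; omega, hj2, ?_⟩
          rw [List.getD_append a [x] 0 j hj1]; exact hj3
        · rintro ⟨j, hj1, hj2, hj3⟩
          simp only [List.length_append, List.length_singleton] at hj1
          rcases Nat.lt_or_ge j a.length with h | h
          · refine ⟨j, h, hj2, ?_⟩
            rw [List.getD_append a [x] 0 j h] at hj3; exact hj3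
          · have hje : j = a.length := by omega
            subst hje
            rw [List.getD_append_right a [x] 0 a.length (le_refl _)] at hj3
            simp at hj3
            exact absurd hj3.symm hv

theorem ctB_loop_iff (a : List Int) (k : Int) (last : PySem.Dict Int Int) :
    ∀ d i, a.length - i = d →
      (ctB_loop a k last i = true ↔
        ∃ i', i ≤ i' ∧ i' + 1 < a.length ∧
          (i' : Int) < PySem.Dict.getD last (PySem.Int.mod k (a.getD i' 0)) (-1)) := by
  intro d
  induction d with
  | zero =>
      intro i hi
      rw [ctB_loop]
      constructor
      · intro h; split_ifs at h <;> omega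
      · rintro ⟨i', h1, h2, _⟩; omega
  | succ d ih =>
      intro i hi
      rw [ctB_loop]
      by_cases h1 : i + 1 < a.length
      · simp only [h1, dif_pos]
        by_cases h2 : (i : Int) < PySem.Dict.getD last (PySem.Int.mod k (a.getD i 0)) (-1)
        · rw [if_pos h2]
          exact ⟨fun _ => ⟨i, le_refl _, h1, h2⟩, fun _ => rfl⟩
        · rw [if_neg h2, ih (i + 1) (by omega)]
          constructor
          · rintro ⟨i', hle, hlt, hd⟩; exact ⟨i', by omega, hlt, hd⟩
          · rintro ⟨i', hle, hlt, hd⟩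
            refine ⟨i', ?_, hlt, hd⟩
            rcases Nat.eq_or_lt_of_le hle with h | h
            · exact absurd (h ▸ hd) h2
            · omega
      · simp only [h1, dif_neg, not_false_iff]
        constructor
        · intro h; exact absurd h (by simp)
        · rintro ⟨i', h2, h3, _⟩; omega

-- ===== VERDICT =====
theorem check_total_spec : Claim_equal_check_total := by
  intro array k _dom _pre
  unfold Spec_check_total
  rw [Bool.eq_iff_iff]
  unfold check_total check_total_alt
  rw [ctA_for_iff array k (array.length - 0) 0 rfl,
      ctB_loop_iff array k (ctB_last array) (array.length - 0) 0 rfl]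
  constructor
  · rintro ⟨i', _, hlt, j, hj1, hj2, hj3⟩
    exact ⟨i', by omega, hlt, (getD_ctB_last_gt array _ i').mpr ⟨j, hj2, hj1, hj3.symm⟩⟩
  · rintro ⟨i', _, hlt, hd⟩
    obtain ⟨j, hj1, hj2, hj3⟩ := (getD_ctB_last_gt array _ i').mp hd
    exact ⟨i', by omega, hlt, j, hj2, hj1, hj3.symm⟩
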